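-- pv_equiv track=rewrite | github.com/zeniverse/-algorithm-practice | Programmers/Level3/공 이동 시뮬레이션.py | solution
-- ===== SOURCE A (Python) =====
-- def solution(n, m, x, y, queries):
--     answer = 0
--     x_min, x_max, y_min, y_max = x, x, y, y
--
--     for idx in range(len(queries) - 1, -1, -1):
--         direc, dist = queries[idx]
--         if direc == 0:  # 좌(오른쪽에서 왔음)
--             y_max += dist  # 오른쪽으로 늘리기
--             if y_max > m - 1: # 범위 벗어나면
--                 y_max = m - 1  # 끝값으로
--             if y_min != 0:  # 왼쪽 값이 끝이 아니면 범위 축소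
--                 y_min += dist
--
--         elif direc == 1:  # 우(왼쪽에서 왔음)
--             y_min -= dist
--             if y_min < 0:
--                 y_min = 0
--             if y_max != m - 1:
--                 y_max -= dist
--
--         elif direc == 2:  # 상(아래서 왔음)
--             x_max += dist
--             if x_max > n - 1:
--                 x_max = n - 1
--             if x_min != 0:
--                 x_min += dist
--
--         else:  # 하(위에서 왔음)
--             x_min -= dist
--             if x_min < 0:
--                 x_min = 0
--             if x_max != n - 1:
--                 x_max -= dist
--         if y_min > m - 1 or y_max < 0 or x_min > n - 1 or x_max < 0:
--             return answer
--     else: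
--          answer = (y_max - y_min + 1) * (x_max - x_min + 1)
--     return answer
-- ===== SOURCE B (Python) =====
-- def solution(n, m, x, y, queries):
--     # The two axes evolve independently: fold each axis's interval over the
--     # reversed queries, insisting that it still touches the board after every
--     # step of the reverse simulation.
--     moves = list(reversed(queries))
--
--     top = m - 1
--     y_lo = y_hi = y
--     for direc, dist in moves:
--         if direc == 0:        # ball had come from the right
--             y_hi = min(y_hi + dist, top)
--             if y_lo != 0:
--                 y_lo += dist
--         elif direc == 1:      # ball had come from the left
--             y_lo = max(y_lo - dist, 0)
--             if y_hi != top: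
--                 y_hi -= dist
--         if y_lo > top or y_hi < 0:
--             return 0
--
--     top = n - 1
--     x_lo = x_hi = x
--     for direc, dist in moves:
--         if direc == 2:        # ball had come from below
--             x_hi = min(x_hi + dist, top)
--             if x_lo != 0:
--                 x_lo += dist
--         elif direc not in (0, 1):  # ball had come from above
--             x_lo = max(x_lo - dist, 0)
--             if x_hi != top:
--                 x_hi -= dist
--         if x_lo > top or x_hi < 0:
--             return 0
--
--     return (y_hi - y_lo + 1) * (x_hi - x_lo + 1)
-- ===== Notes on version B (the rewrite author's own statement) =====
-- stated objective: alternative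
-- what changed: B replaces A's single indexed reverse loop over a four-bound state with two independent per-axis interval folds over the reversed queries, each exiting with 0 as soon as its own interval leaves the board; Pre_ excludes inputs containing an inner query list whose length is not 2, on which A's lazy per-index unpacking raises unless an early collapse return happens first while B's first loop unpacks every query.
-- outside the precondition, e.g. on solution(1, 5, 5, 0, [[], [2, 3]]): A returns 0, B raises ValueError
import Mathlib
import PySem

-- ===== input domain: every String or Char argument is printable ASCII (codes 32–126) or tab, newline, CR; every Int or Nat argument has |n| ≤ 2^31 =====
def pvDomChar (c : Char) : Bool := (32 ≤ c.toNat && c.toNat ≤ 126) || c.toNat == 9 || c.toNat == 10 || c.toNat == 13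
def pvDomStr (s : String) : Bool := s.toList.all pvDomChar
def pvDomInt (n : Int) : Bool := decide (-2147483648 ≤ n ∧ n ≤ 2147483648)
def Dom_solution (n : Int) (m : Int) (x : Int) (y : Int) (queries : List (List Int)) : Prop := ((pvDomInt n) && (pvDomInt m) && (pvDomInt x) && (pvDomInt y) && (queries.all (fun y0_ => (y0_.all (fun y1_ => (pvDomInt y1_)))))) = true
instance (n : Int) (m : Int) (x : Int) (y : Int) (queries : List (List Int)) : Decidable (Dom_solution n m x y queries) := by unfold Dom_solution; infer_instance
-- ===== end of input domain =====

-- B decomposes A's single four-bound reverse simulation into two independent per-axis interval folds; same cost, return values proved equal on Pre_.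

-- ===== PORT A =====
-- the loop 'for idx in range(len(queries)-1,-1,-1)': state (x_min,x_max,y_min,y_max);
-- an early 'return answer' (answer = 0) on collapse; the '_ => 0' arm is where Python
-- raises (IndexError / unpacking ValueError), outside Pre_.
def solA_go (n : Int) (m : Int) (queries : List (List Int)) :
    List Int → Int → Int → Int → Int → Int
  | [], xmin, xmax, ymin, ymax => (ymax - ymin + 1) * (xmax - xmin + 1)
  | idx :: rest, xmin, xmax, ymin, ymax =>
    match PySem.List.pyGet? queries idx with
    | some [direc, dist] =>
      if direc = 0 then
        let ymax1 := ymax + dist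
        let ymax2 := if ymax1 > m - 1 then m - 1 else ymax1
        let ymin2 := if ymin ≠ 0 then ymin + dist else ymin
        if ymin2 > m - 1 ∨ ymax2 < 0 ∨ xmin > n - 1 ∨ xmax < 0 then 0
        else solA_go n m queries rest xmin xmax ymin2 ymax2
      else if direc = 1 then
        let ymin1 := ymin - dist
        let ymin2 := if ymin1 < 0 then 0 else ymin1
        let ymax2 := if ymax ≠ m - 1 then ymax - dist else ymax
        if ymin2 > m - 1 ∨ ymax2 < 0 ∨ xmin > n - 1 ∨ xmax < 0 then 0
        else solA_go n m queries rest xmin xmax ymin2 ymax2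
      else if direc = 2 then
        let xmax1 := xmax + dist
        let xmax2 := if xmax1 > n - 1 then n - 1 else xmax1
        let xmin2 := if xmin ≠ 0 then xmin + dist else xmin
        if ymin > m - 1 ∨ ymax < 0 ∨ xmin2 > n - 1 ∨ xmax2 < 0 then 0
        else solA_go n m queries rest xmin2 xmax2 ymin ymax
      else
        let xmin1 := xmin - dist
        let xmin2 := if xmin1 < 0 then 0 else xmin1
        let xmax2 := if xmax ≠ n - 1 then xmax - dist else xmax
        if ymin > m - 1 ∨ ymax < 0 ∨ xmin2 > n - 1 ∨ xmax2 < 0 then 0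
        else solA_go n m queries rest xmin2 xmax2 ymin ymax
    | _ => 0

def solution (n : Int) (m : Int) (x : Int) (y : Int) (queries : List (List Int)) : Int :=
  solA_go n m queries (PySem.List.pyRange ((queries.length : Int) - 1) (-1) (-1)) x x y y

-- ===== PORT B =====
-- Source B's first loop (the y axis over the reversed queries): state (y_lo, y_hi),
-- top = m - 1; 'none' = Source B's early 'return 0'.  The '_ => none' arm is where
-- Python's 'for direc, dist in moves' unpacking raises, outside Pre_.
def foldYGo (top : Int) : List (List Int) → Int → Int → Option (Int × Int)
  | [], lo, hi => some (lo, hi)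
  | q :: rest, lo, hi =>
    match q with
    | [direc, dist] =>
      if direc = 0 then
        let hi2 := min (hi + dist) top
        let lo2 := if lo ≠ 0 then lo + dist else lo
        if lo2 > top ∨ hi2 < 0 then none else foldYGo top rest lo2 hi2
      else if direc = 1 then
        let lo2 := max (lo - dist) 0
        let hi2 := if hi ≠ top then hi - dist else hi
        if lo2 > top ∨ hi2 < 0 then none else foldYGo top rest lo2 hi2
      else
        if lo > top ∨ hi < 0 then none else foldYGo top rest lo hi
    | _ => none

-- Source B's second loop (the x axis): grow on 2, skip on 0/1, shrink otherwise
def foldXGo (top : Int) : List (List Int) → Int → Int → Option (Int × Int)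
  | [], lo, hi => some (lo, hi)
  | q :: rest, lo, hi =>
    match q with
    | [direc, dist] =>
      if direc = 2 then
        let hi2 := min (hi + dist) top
        let lo2 := if lo ≠ 0 then lo + dist else lo
        if lo2 > top ∨ hi2 < 0 then none else foldXGo top rest lo2 hi2
      else if direc = 0 ∨ direc = 1 then
        if lo > top ∨ hi < 0 then none else foldXGo top rest lo hi
      else
        let lo2 := max (lo - dist) 0
        let hi2 := if hi ≠ top then hi - dist else hi
        if lo2 > top ∨ hi2 < 0 then none else foldXGo top rest lo2 hi2
    | _ => none

def solution_alt (n : Int) (m : Int) (x : Int) (y : Int) (queries : List (List Int)) : Int :=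
  match foldYGo (m - 1) queries.reverse y y with
  | none => 0
  | some (ylo, yhi) =>
    match foldXGo (n - 1) queries.reverse x x with
    | none => 0
    | some (xlo, xhi) => (yhi - ylo + 1) * (xhi - xlo + 1)

-- ===== PRECONDITION & SPEC =====
-- Pre_ excludes inputs containing an inner query list whose length is not 2: there
-- A's 'direc, dist = queries[idx]' raises (ValueError/IndexError) unless a bounds
-- collapse happens to end the loop before the malformed entry is reached, and B
-- (whose y-axis loop unpacks every query) raises on every such input it reaches.
def Pre_solution (n : Int) (m : Int) (x : Int) (y : Int) (queries : List (List Int)) : Prop :=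
  ∀ q ∈ queries, q.length = 2
instance (n : Int) (m : Int) (x : Int) (y : Int) (queries : List (List Int)) : Decidable (Pre_solution n m x y queries) := by unfold Pre_solution; infer_instance

def pvWitness_solution : Int × Int × Int × Int × List (List Int) :=
  (3, 4, 1, 2, [[0, 2], [3, 1], [1, 1], [2, 3]])

def Spec_solution (n : Int) (m : Int) (x : Int) (y : Int) (queries : List (List Int)) (out : Int) : Prop := out = solution_alt n m x y queries
instance (n : Int) (m : Int) (x : Int) (y : Int) (queries : List (List Int)) (out : Int) : Decidable (Spec_solution n m x y queries out) := by unfold Spec_solution; infer_instance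

-- ===== CLAIM (what is proved, stated in full; the proofs are below) =====
def Claim_equal_solution : Prop := ∀ (n : Int) (m : Int) (x : Int) (y : Int) (queries : List (List Int)), Dom_solution n m x y queries → Pre_solution n m x y queries → Spec_solution n m x y queries (solution n m x y queries)

-- ===== LEMMAS AND PROOFS =====

-- proof-only view of A's loop: the same body as solA_go, but consuming the visited
-- query elements directly instead of their indices
def goElem (n m : Int) : List (List Int) → Int → Int → Int → Int → Int
  | [], xmin, xmax, ymin, ymax => (ymax - ymin + 1) * (xmax - xmin + 1)
  | q :: rest, xmin, xmax, ymin, ymax =>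
    match q with
    | [direc, dist] =>
      if direc = 0 then
        let ymax1 := ymax + dist
        let ymax2 := if ymax1 > m - 1 then m - 1 else ymax1
        let ymin2 := if ymin ≠ 0 then ymin + dist else ymin
        if ymin2 > m - 1 ∨ ymax2 < 0 ∨ xmin > n - 1 ∨ xmax < 0 then 0
        else goElem n m rest xmin xmax ymin2 ymax2
      else if direc = 1 then
        let ymin1 := ymin - dist
        let ymin2 := if ymin1 < 0 then 0 else ymin1
        let ymax2 := if ymax ≠ m - 1 then ymax - dist else ymax
        if ymin2 > m - 1 ∨ ymax2 < 0 ∨ xmin > n - 1 ∨ xmax < 0 then 0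
        else goElem n m rest xmin xmax ymin2 ymax2
      else if direc = 2 then
        let xmax1 := xmax + dist
        let xmax2 := if xmax1 > n - 1 then n - 1 else xmax1
        let xmin2 := if xmin ≠ 0 then xmin + dist else xmin
        if ymin > m - 1 ∨ ymax < 0 ∨ xmin2 > n - 1 ∨ xmax2 < 0 then 0
        else goElem n m rest xmin2 xmax2 ymin ymax
      else
        let xmin1 := xmin - dist
        let xmin2 := if xmin1 < 0 then 0 else xmin1
        let xmax2 := if xmax ≠ n - 1 then xmax - dist else xmax
        if ymin > m - 1 ∨ ymax < 0 ∨ xmin2 > n - 1 ∨ xmax2 < 0 then 0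
        else goElem n m rest xmin2 xmax2 ymin ymax
    | _ => 0

-- the combination of the two axis folds that solution_alt performs
def combineAxes : Option (Int × Int) → Option (Int × Int) → Int
  | none, _ => 0
  | some _, none => 0
  | some (ylo, yhi), some (xlo, xhi) => (yhi - ylo + 1) * (xhi - xlo + 1)

lemma combineAxes_none_right (a : Option (Int × Int)) : combineAxes a none = 0 := by
  rcases a with _ | ⟨p, q⟩ <;> rfl

lemma solution_alt_eq_combine (n m x y : Int) (queries : List (List Int)) :
    solution_alt n m x y queries =
      combineAxes (foldYGo (m - 1) queries.reverse y y)
                  (foldXGo (n - 1) queries.reverse x x) := by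
  unfold solution_alt
  rcases hy : foldYGo (m - 1) queries.reverse y y with _ | ⟨ylo, yhi⟩ <;>
    rcases hx : foldXGo (n - 1) queries.reverse x x with _ | ⟨xlo, xhi⟩ <;>
      simp [combineAxes, hy, hx]

-- core: A's combined loop equals the two axis folds, on every state
lemma go_elem_eq (n m : Int) :
    ∀ (l : List (List Int)) (xmin xmax ymin ymax : Int),
      goElem n m l xmin xmax ymin ymax =
        combineAxes (foldYGo (m - 1) l ymin ymax)
                    (foldXGo (n - 1) l xmin xmax) := by
  intro l
  induction l with
  | nil => intro xmin xmax ymin ymax; simp [goElem, foldYGo, foldXGo, combineAxes]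
  | cons q rest ih =>
    intro xmin xmax ymin ymax
    rcases q with _ | ⟨d, q1⟩
    · simp [goElem, foldYGo, foldXGo, combineAxes]
    rcases q1 with _ | ⟨t, q2⟩
    · simp [goElem, foldYGo, foldXGo, combineAxes]
    rcases q2 with _ | ⟨u, q3⟩
    swap
    · simp [goElem, foldYGo, foldXGo, combineAxes]
    by_cases h0 : d = 0
    · subst h0
      simp only [goElem, foldYGo, foldXGo, min_def, max_def]
      norm_num
      split_ifs <;>
        first
          | rfl
          | (exfalso; omega)
          | (exact (combineAxes_none_right _).symm)
          | (exact ih _ _ _ _)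
    · by_cases h1 : d = 1
      · subst h1
        simp only [goElem, foldYGo, foldXGo, min_def, max_def]
        norm_num
        split_ifs <;>
          first
            | rfl
            | (exfalso; omega)
            | (exact (combineAxes_none_right _).symm)
            | (exact ih _ _ _ _)
            | (convert ih _ _ _ _ using 5 <;> omega)
      · by_cases h2 : d = 2
        · subst h2
          simp only [goElem, foldYGo, foldXGo, min_def, max_def]
          norm_num
          split_ifs <;>
            first
              | rfl
              | (exfalso; omega)
              | (exact (combineAxes_none_right _).symm)
              | (exact ih _ _ _ _)
        · have h01 : ¬(d = 0 ∨ d = 1) := by tauto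
          simp only [goElem, foldYGo, foldXGo, min_def, max_def,
            if_neg h0, if_neg h1, if_neg h2, if_neg h01]
          split_ifs <;>
            first
              | rfl
              | (exfalso; omega)
              | (exact (combineAxes_none_right _).symm)
              | (exact ih _ _ _ _)
              | (convert ih _ _ _ _ using 5 <;> omega)

-- A's index loop over range(len-1,-1,-1) visits the reversed prefix elements.
lemma solA_go_eq_goElem (n m : Int) (qs : List (List Int)) :
    ∀ (k : Nat), k ≤ qs.length →
      ∀ xmin xmax ymin ymax : Int,
        solA_go n m qs (PySem.List.pyRange ((k : Int) - 1) (-1) (-1)) xmin xmax ymin ymax =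
          goElem n m ((qs.take k).reverse) xmin xmax ymin ymax := by
  intro k
  induction k with
  | zero =>
    intro _ xmin xmax ymin ymax
    rw [PySem.List.pyRange_neg_one_eq_nil (by omega)]
    simp [solA_go, goElem]
  | succ k ih =>
    intro hk xmin xmax ymin ymax
    have hklt : k < qs.length := by omega
    have hcast : ((k + 1 : Nat) : Int) - 1 = (k : Int) := by push_cast; ring
    rw [hcast, PySem.List.pyRange_neg_one_cons (by omega)]
    have hget : PySem.List.pyGet? qs (k : Int) = some qs[k] := by
      rw [PySem.List.pyGet?_natCast]
      exact List.getElem?_eq_getElem hklt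
    have htake : (qs.take (k + 1)).reverse = qs[k] :: (qs.take k).reverse := by
      rw [List.take_add_one, List.getElem?_eq_getElem hklt]
      simp
    rcases hq : qs[k] with _ | ⟨d, q1⟩ <;> rw [hq] at hget htake <;> rw [htake] <;>
      [skip; rcases q1 with _ | ⟨t, q2⟩] <;>
      [skip; skip; rcases q2 with _ | ⟨u, q3⟩] <;>
      simp only [solA_go, goElem, hget] <;>
      first
        | rfl
        | (split_ifs <;> first | rfl | (exact ih (by omega) _ _ _ _))

-- ===== VERDICT (by name: the statement is the Claim_ definition above) =====
theorem solution_spec : Claim_equal_solution := by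
  intro n m x y queries _ _
  unfold Spec_solution solution
  rw [solA_go_eq_goElem n m queries queries.length (le_refl _), List.take_length,
      go_elem_eq n m queries.reverse x x y y,
      solution_alt_eq_combine n m x y queries]
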